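-- pv_equiv track=rewrite | github.com/loadsoth/DSBrowser | dsconfig.py | search_great
-- ===== SOURCE A (Python) =====
-- def search_great( flist , mlist ):
--     ret = False
--     fflg = [0,0,0,0]
--     mflg = [0,0,0,0]
--
--     for i in range(0,4):
--         for j in range(0,4):
--             if flist[i] == mlist[j]:
--                 fflg[i] = 1
--                 mflg[j] = 1
--
--     if fflg[0] and fflg[1] and fflg[2] and fflg[3]:
--         if mflg[0] and mflg[1] and mflg[2] and mflg[3]:
--             ret = True
--
--     return ret
-- ===== SOURCE B (Python) =====
-- def search_great(flist, mlist):
--     # Canonicalize each side into the set of its first four elements and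
--     # compare the two sets: mutual coverage == set equality.
--     return {flist[i] for i in range(4)} == {mlist[i] for i in range(4)}
-- ===== Notes on version B (the rewrite author's own statement) =====
-- stated objective: simpler
-- what changed: Replaces the two flag arrays and the 4x4 nested scan with a canonicalization: build the hash set of each list's first four elements and compare the two sets for equality in one step.
import Mathlib
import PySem

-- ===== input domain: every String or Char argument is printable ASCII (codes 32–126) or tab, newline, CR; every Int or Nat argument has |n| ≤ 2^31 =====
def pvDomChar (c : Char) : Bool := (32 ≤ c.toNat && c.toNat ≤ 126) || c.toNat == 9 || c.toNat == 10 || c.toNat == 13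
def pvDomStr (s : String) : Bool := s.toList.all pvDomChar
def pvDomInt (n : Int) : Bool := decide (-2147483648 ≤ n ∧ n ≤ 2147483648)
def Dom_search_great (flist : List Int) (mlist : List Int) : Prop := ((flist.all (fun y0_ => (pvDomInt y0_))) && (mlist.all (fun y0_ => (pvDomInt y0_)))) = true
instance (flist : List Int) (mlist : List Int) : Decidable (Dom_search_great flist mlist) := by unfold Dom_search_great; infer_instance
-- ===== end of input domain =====

-- B replaces A's flag arrays and 4x4 nested scan with a canonicalization: build the
-- set of each list's first four elements and compare the two sets (objective: simpler).

-- ===== PORT A =====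
-- A-side helper: the body of the inner j-loop ('if flist[i] == mlist[j]: fflg[i] = 1; mflg[j] = 1').
def sgStep (flist : List Int) (mlist : List Int) (i : Int) (st : List Int × List Int) (j : Int) : List Int × List Int :=
  if (PySem.List.pyGet? flist i).getD 0 = (PySem.List.pyGet? mlist j).getD 0 then
    (st.1.set i.toNat 1, st.2.set j.toNat 1)
  else st

-- Nested loops over i,j in range(0,4); flag lists fflg/mflg; the final truthiness
-- test 'fflg[k] and ...' on these int flags is 'value ≠ 0'.
def search_great (flist : List Int) (mlist : List Int) : Bool :=
  let ret := false
  let fflg : List Int := [0, 0, 0, 0]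
  let mflg : List Int := [0, 0, 0, 0]
  let st :=
    (PySem.List.pyRange 0 4 1).foldl (fun (st : List Int × List Int) i =>
      (PySem.List.pyRange 0 4 1).foldl (sgStep flist mlist i) st) (fflg, mflg)
  let fflg := st.1
  let mflg := st.2
  let ret :=
    if (PySem.List.pyGet? fflg 0).getD 0 ≠ 0 ∧ (PySem.List.pyGet? fflg 1).getD 0 ≠ 0 ∧
       (PySem.List.pyGet? fflg 2).getD 0 ≠ 0 ∧ (PySem.List.pyGet? fflg 3).getD 0 ≠ 0 then
      if (PySem.List.pyGet? mflg 0).getD 0 ≠ 0 ∧ (PySem.List.pyGet? mflg 1).getD 0 ≠ 0 ∧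
         (PySem.List.pyGet? mflg 2).getD 0 ≠ 0 ∧ (PySem.List.pyGet? mflg 3).getD 0 ≠ 0 then
        true
      else ret
    else ret
  ret

-- ===== PORT B =====
-- '{flist[i] for i in range(4)} == {mlist[i] for i in range(4)}': two set
-- comprehensions (PySem.Set.ofList) compared with Python set equality (Set.equal).
def search_great_alt (flist : List Int) (mlist : List Int) : Bool :=
  let f := PySem.Set.ofList ((List.range 4).map (fun i => (PySem.List.pyGet? flist (Int.ofNat i)).getD 0))
  let m := PySem.Set.ofList ((List.range 4).map (fun i => (PySem.List.pyGet? mlist (Int.ofNat i)).getD 0))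
  PySem.Set.equal f m

-- ===== PRECONDITION & SPEC =====
-- Pre_ excludes exactly the inputs where A raises IndexError: a list shorter than 4
-- (B raises there too, via the same out-of-range indexing).
def Pre_search_great (flist : List Int) (mlist : List Int) : Prop :=
  4 ≤ flist.length ∧ 4 ≤ mlist.length
instance (flist : List Int) (mlist : List Int) : Decidable (Pre_search_great flist mlist) := by
  unfold Pre_search_great; infer_instance

def pvWitness_search_great : List Int × List Int := ([1, 2, 3, 4], [4, 3, 2, 1])

def Spec_search_great (flist : List Int) (mlist : List Int) (out : Bool) : Prop := out = search_great_alt flist mlist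
instance (flist : List Int) (mlist : List Int) (out : Bool) : Decidable (Spec_search_great flist mlist out) := by unfold Spec_search_great; infer_instance

-- ===== CLAIM (what is proved, stated in full; the proofs are below) =====
def Claim_equal_search_great : Prop := ∀ (flist : List Int) (mlist : List Int), Dom_search_great flist mlist → Pre_search_great flist mlist → Spec_search_great flist mlist (search_great flist mlist)

-- ===== LEMMAS AND PROOFS =====

theorem pyRange04 : PySem.List.pyRange 0 4 1 = [0, 1, 2, 3] := by decide

theorem pg0 (m0 m1 m2 m3 : Int) (mr : List Int) : PySem.List.pyGet? (m0::m1::m2::m3::mr) 0 = some m0 := by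
  rw [show (0:Int) = ((0:Nat):Int) from rfl, PySem.List.pyGet?_natCast]; rfl
theorem pg1 (m0 m1 m2 m3 : Int) (mr : List Int) : PySem.List.pyGet? (m0::m1::m2::m3::mr) 1 = some m1 := by
  rw [show (1:Int) = ((1:Nat):Int) from rfl, PySem.List.pyGet?_natCast]; rfl
theorem pg2 (m0 m1 m2 m3 : Int) (mr : List Int) : PySem.List.pyGet? (m0::m1::m2::m3::mr) 2 = some m2 := by
  rw [show (2:Int) = ((2:Nat):Int) from rfl, PySem.List.pyGet?_natCast]; rfl
theorem pg3 (m0 m1 m2 m3 : Int) (mr : List Int) : PySem.List.pyGet? (m0::m1::m2::m3::mr) 3 = some m3 := by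
  rw [show (3:Int) = ((3:Nat):Int) from rfl, PySem.List.pyGet?_natCast]; rfl

-- One full inner j-loop of A (row i): characterizes both flag lists after the row.
set_option maxRecDepth 4096 in
theorem sg_row (flist : List Int) (m0 m1 m2 m3 : Int) (mr : List Int) (i : Int)
    (ff : List Int) (g0 g1 g2 g3 : Int) :
    List.foldl (sgStep flist (m0 :: m1 :: m2 :: m3 :: mr) i) (ff, [g0, g1, g2, g3]) [0, 1, 2, 3] =
    ((if (PySem.List.pyGet? flist i).getD 0 = m0 ∨ (PySem.List.pyGet? flist i).getD 0 = m1 ∨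
         (PySem.List.pyGet? flist i).getD 0 = m2 ∨ (PySem.List.pyGet? flist i).getD 0 = m3 then
        ff.set i.toNat 1 else ff),
     [if (PySem.List.pyGet? flist i).getD 0 = m0 then 1 else g0,
      if (PySem.List.pyGet? flist i).getD 0 = m1 then 1 else g1,
      if (PySem.List.pyGet? flist i).getD 0 = m2 then 1 else g2,
      if (PySem.List.pyGet? flist i).getD 0 = m3 then 1 else g3]) := by
  simp only [List.foldl_cons, List.foldl_nil, sgStep, pg0, pg1, pg2, pg3, Option.getD_some]
  by_cases h0 : (PySem.List.pyGet? flist i).getD 0 = m0 <;>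
  by_cases h1 : (PySem.List.pyGet? flist i).getD 0 = m1 <;>
  by_cases h2 : (PySem.List.pyGet? flist i).getD 0 = m2 <;>
  by_cases h3 : (PySem.List.pyGet? flist i).getD 0 = m3 <;>
    simp_all [List.set_set]

theorem ite_cons_push (c : Prop) [Decidable c] (x y : Int) (xs ys : List Int) :
    (if c then x :: xs else y :: ys) = (if c then x else y) :: (if c then xs else ys) := by
  split_ifs <;> rfl

theorem ite_one_ne_zero (c : Prop) [Decidable c] (x : Int) :
    ((if c then (1 : Int) else x) ≠ 0) ↔ (c ∨ x ≠ 0) := by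
  split_ifs with h <;> simp [h]

theorem ite_bool_true (c : Prop) [Decidable c] (x : Bool) :
    ((if c then x else false) = true) ↔ (c ∧ x = true) := by
  split_ifs with h <;> simp [h]

-- orientation/order bridge between A's mflg row and the m-direction coverage clauses
theorem row_comm (a0 a1 a2 a3 x : Int) :
    (a3 = x ∨ a2 = x ∨ a1 = x ∨ a0 = x) ↔ (x = a0 ∨ x = a1 ∨ x = a2 ∨ x = a3) := by
  constructor <;> rintro (h | h | h | h) <;> simp [h]

-- A on 4+4 explicit heads: mutual coverage of {f0..f3} and {m0..m3}.
set_option maxRecDepth 16384 in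
set_option maxHeartbeats 1000000 in
theorem sgA_true_iff (f0 f1 f2 f3 m0 m1 m2 m3 : Int) (fr mr : List Int) :
    search_great (f0::f1::f2::f3::fr) (m0::m1::m2::m3::mr) = true ↔
    ((f0 = m0 ∨ f0 = m1 ∨ f0 = m2 ∨ f0 = m3) ∧ (f1 = m0 ∨ f1 = m1 ∨ f1 = m2 ∨ f1 = m3) ∧
     (f2 = m0 ∨ f2 = m1 ∨ f2 = m2 ∨ f2 = m3) ∧ (f3 = m0 ∨ f3 = m1 ∨ f3 = m2 ∨ f3 = m3)) ∧
    ((m0 = f0 ∨ m0 = f1 ∨ m0 = f2 ∨ m0 = f3) ∧ (m1 = f0 ∨ m1 = f1 ∨ m1 = f2 ∨ m1 = f3) ∧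
     (m2 = f0 ∨ m2 = f1 ∨ m2 = f2 ∨ m2 = f3) ∧ (m3 = f0 ∨ m3 = f1 ∨ m3 = f2 ∨ m3 = f3)) := by
  simp only [search_great, pyRange04]
  rw [List.foldl_cons]; rw [sg_row]
  rw [List.foldl_cons]; rw [sg_row]
  rw [List.foldl_cons]; rw [sg_row]
  rw [List.foldl_cons]; rw [sg_row]
  rw [List.foldl_nil]
  simp only [pg0, pg1, pg2, pg3, Option.getD_some,
    show ((0 : Int).toNat) = 0 from rfl, show ((1 : Int).toNat) = 1 from rfl,
    show ((2 : Int).toNat) = 2 from rfl, show ((3 : Int).toNat) = 3 from rfl,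
    List.set, ite_cons_push, ite_self]
  simp only [ite_bool_true, ne_eq, ite_one_ne_zero, not_true, or_false, and_true]
  rw [row_comm f0 f1 f2 f3 m0, row_comm f0 f1 f2 f3 m1,
      row_comm f0 f1 f2 f3 m2, row_comm f0 f1 f2 f3 m3]

-- B on 4+4 explicit heads: set equality stated as a members-iff.
theorem alt_true_iff (f0 f1 f2 f3 m0 m1 m2 m3 : Int) (fr mr : List Int) :
    search_great_alt (f0::f1::f2::f3::fr) (m0::m1::m2::m3::mr) = true ↔
    ∀ x : Int, (x = f0 ∨ x = f1 ∨ x = f2 ∨ x = f3) ↔ (x = m0 ∨ x = m1 ∨ x = m2 ∨ x = m3) := by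
  have hun : search_great_alt (f0::f1::f2::f3::fr) (m0::m1::m2::m3::mr) =
      PySem.Set.equal (PySem.Set.ofList [f0, f1, f2, f3]) (PySem.Set.ofList [m0, m1, m2, m3]) := by
    simp only [search_great_alt, show List.range 4 = [0, 1, 2, 3] from rfl, List.map,
      show Int.ofNat 0 = (0 : Int) from rfl, show Int.ofNat 1 = (1 : Int) from rfl,
      show Int.ofNat 2 = (2 : Int) from rfl, show Int.ofNat 3 = (3 : Int) from rfl,
      pg0, pg1, pg2, pg3, Option.getD_some]
  rw [hun, PySem.Set.equal_iff]
  constructor <;> intro h x <;>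
    simpa only [PySem.Set.mem_ofList, List.mem_cons, List.not_mem_nil, or_false] using h x

-- ===== VERDICT (by name: the statement is the Claim_ definition above) =====
theorem search_great_spec : Claim_equal_search_great := by
  intro flist mlist hdom hPre
  obtain ⟨hf, hm⟩ := hPre
  clear hdom
  rcases flist with _ | ⟨f0, _ | ⟨f1, _ | ⟨f2, _ | ⟨f3, fr⟩⟩⟩⟩ <;> simp at hf
  rcases mlist with _ | ⟨m0, _ | ⟨m1, _ | ⟨m2, _ | ⟨m3, mr⟩⟩⟩⟩ <;> simp at hm
  clear hf hm
  show search_great _ _ = search_great_alt _ _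
  rw [Bool.eq_iff_iff, sgA_true_iff, alt_true_iff]
  constructor
  · rintro ⟨⟨hf0, hf1, hf2, hf3⟩, hm0, hm1, hm2, hm3⟩ x
    constructor
    · rintro (rfl | rfl | rfl | rfl) <;> tauto
    · rintro (rfl | rfl | rfl | rfl) <;> tauto
  · intro hF
    refine ⟨⟨?_, ?_, ?_, ?_⟩, ?_, ?_, ?_, ?_⟩
    · have := (hF f0).mp (by tauto); tauto
    · have := (hF f1).mp (by tauto); tauto
    · have := (hF f2).mp (by tauto); tauto
    · have := (hF f3).mp (by tauto); tauto
    · have := (hF m0).mpr (by tauto); tauto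
    · have := (hF m1).mpr (by tauto); tauto
    · have := (hF m2).mpr (by tauto); tauto
    · have := (hF m3).mpr (by tauto); tauto
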